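-- pv_equiv track=rewrite | github.com/mlaversi/tp | Ex5/utils_pos.py | assign_oov
-- ===== SOURCE A (Python) =====
-- import string
--
-- punct = set(string.punctuation)
--
-- noun_suffix = ["action", "age", "ance", "cy", "dom", "ee", "ence", "er", "hood", "ion", "ism", "ist", "ity", "ling", "ment", "ness", "or", "ry", "scape", "ship", "ty"]
--
-- verb_suffix = ["ate", "ify", "ise", "ize"]
--
-- adj_suffix = ["able", "ese", "ful", "i", "ian", "ible", "ic", "ish", "ive", "less", "ly", "ous"]
--
-- adv_suffix = ["ward", "wards", "wise"]
--
-- def assign_oov(tok):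
--     """
--     Assign oov word tokens
--     """
--     # Digits
--     if any(char.isdigit() for char in tok):
--         return "--oov_digit--"
--
--     # Punctuation
--     elif any(char in punct for char in tok):
--         return "--oov_punct--"
--
--     # Upper-case
--     elif any(char.isupper() for char in tok):
--         return "--oov_upper--"
--
--     # Nouns
--     elif any(tok.endswith(suffix) for suffix in noun_suffix):
--         return "--oov_noun--"
--
--     # Verbs
--     elif any(tok.endswith(suffix) for suffix in verb_suffix):
--         return "--oov_verb--"
--
--     # Adjectives
--     elif any(tok.endswith(suffix) for suffix in adj_suffix):
--         return "--oov_adj--"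
--
--     # Adverbs
--     elif any(tok.endswith(suffix) for suffix in adv_suffix):
--         return "--oov_adv--"
--
--     return "--oov--"
-- ===== SOURCE B (Python) =====
-- import string
--
-- _PUNCT = set(string.punctuation)
--
-- _LAB = ["--oov_noun--", "--oov_verb--", "--oov_adj--", "--oov_adv--", "--oov--"]
--
-- _SUF = {}
-- for _p, _lst in enumerate([
--     ["action", "age", "ance", "cy", "dom", "ee", "ence", "er", "hood", "ion", "ism", "ist", "ity", "ling", "ment", "ness", "or", "ry", "scape", "ship", "ty"],
--     ["ate", "ify", "ise", "ize"],
--     ["able", "ese", "ful", "i", "ian", "ible", "ic", "ish", "ive", "less", "ly", "ous"],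
--     ["ward", "wards", "wise"],
-- ]):
--     for _s in _lst:
--         _SUF[_s] = _p
--
-- def _code(ch):
--     if ch.isdigit():
--         return 3
--     if ch in _PUNCT:
--         return 2
--     if ch.isupper():
--         return 1
--     return 0
--
-- def assign_oov(tok):
--     m = 0
--     for ch in tok:
--         m = max(m, _code(ch))
--     if m:
--         return ("--oov_upper--", "--oov_punct--", "--oov_digit--")[m - 1]
--     best = 4
--     for k in range(1, min(len(tok), 6) + 1):
--         best = min(best, _SUF.get(tok[-k:], 4))
--     return _LAB[best]
-- ===== Notes on version B (the rewrite author's own statement) =====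
-- stated objective: alternative
-- what changed: Replaced A's three separate character scans and four endswith-scans over all 40 suffixes by a single per-character severity code (digit=3, punct=2, upper=1) folded with max, and a reverse suffix lookup: the token's own at-most-6 trailing substrings are looked up in one suffix-to-priority dictionary and the minimum matched priority picks the label.
import Mathlib
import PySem

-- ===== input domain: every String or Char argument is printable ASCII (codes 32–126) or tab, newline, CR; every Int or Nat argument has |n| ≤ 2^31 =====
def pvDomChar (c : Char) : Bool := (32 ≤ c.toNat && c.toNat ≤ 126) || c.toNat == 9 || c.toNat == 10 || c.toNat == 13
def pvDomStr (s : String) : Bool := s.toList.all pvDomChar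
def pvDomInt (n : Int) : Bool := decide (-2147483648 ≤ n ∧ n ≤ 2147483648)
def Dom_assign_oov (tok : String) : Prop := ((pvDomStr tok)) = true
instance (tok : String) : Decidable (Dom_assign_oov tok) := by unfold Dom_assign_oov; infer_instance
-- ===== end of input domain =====

-- B replaces A's three character scans and four endswith-scans over 40 suffixes by a per-character
-- severity code folded with max, plus a reverse lookup of the token's own ≤6 trailing substrings
-- in a suffix→priority dictionary (objective: alternative).

-- shared module constants (string.punctuation and the four suffix lists of the Python module)
def punctList : List Char := "!\"#$%&'()*+,-./:;<=>?@[\\]^_`{|}~".toList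
def noun_suffix : List String := ["action", "age", "ance", "cy", "dom", "ee", "ence", "er", "hood", "ion", "ism", "ist", "ity", "ling", "ment", "ness", "or", "ry", "scape", "ship", "ty"]
def verb_suffix : List String := ["ate", "ify", "ise", "ize"]
def adj_suffix : List String := ["able", "ese", "ful", "i", "ian", "ible", "ic", "ish", "ive", "less", "ly", "ous"]
def adv_suffix : List String := ["ward", "wards", "wise"]

-- ===== PORT A =====
def assign_oov (tok : String) : String :=
  if tok.toList.any (fun c => PySem.Chars.isdigit c) then "--oov_digit--"
  else if tok.toList.any (fun c => punctList.contains c) then "--oov_punct--"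
  else if tok.toList.any (fun c => PySem.Chars.isupper c) then "--oov_upper--"
  else if noun_suffix.any (fun s => PySem.Str.endswith tok s) then "--oov_noun--"
  else if verb_suffix.any (fun s => PySem.Str.endswith tok s) then "--oov_verb--"
  else if adj_suffix.any (fun s => PySem.Str.endswith tok s) then "--oov_adj--"
  else if adv_suffix.any (fun s => PySem.Str.endswith tok s) then "--oov_adv--"
  else "--oov--"

-- ===== PORT B =====
-- _LAB of Source B
def labB : List String := ["--oov_noun--", "--oov_verb--", "--oov_adj--", "--oov_adv--", "--oov--"]

-- _SUF of Source B: suffix → priority dictionary, built from the enumerated category lists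
def sufDict : PySem.Dict String Int :=
  (PySem.List.enumerate [noun_suffix, verb_suffix, adj_suffix, adv_suffix] 0).foldl
    (fun d pl => pl.2.foldl (fun d s => d.insert s pl.1) d) PySem.Dict.empty

-- _code of Source B: severity code of one character (digit 3 > punct 2 > upper 1 > other 0)
def codeB (ch : Char) : Int :=
  if PySem.Chars.isdigit ch then 3
  else if punctList.contains ch then 2
  else if PySem.Chars.isupper ch then 1
  else 0

def assign_oov_alt (tok : String) : String :=
  let m := tok.toList.foldl (fun m ch => max m (codeB ch)) 0
  if m ≠ 0 then PySem.List.pyGetD ["--oov_upper--", "--oov_punct--", "--oov_digit--"] (m - 1) ""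
  else
    let best := (PySem.List.pyRange 1 (min (PySem.Str.len tok) 6 + 1) 1).foldl
      (fun best k => min best (sufDict.getD (PySem.Str.slice tok (some (-k)) none) 4)) 4
    PySem.List.pyGetD labB best ""

-- ===== PRECONDITION & SPEC =====
def Spec_assign_oov (tok : String) (out : String) : Prop := out = assign_oov_alt tok
instance (tok : String) (out : String) : Decidable (Spec_assign_oov tok out) := by unfold Spec_assign_oov; infer_instance

-- ===== CLAIM (what is proved, stated in full; the proofs are below) =====
def Claim_equal_assign_oov : Prop := ∀ (tok : String), Dom_assign_oov tok → Spec_assign_oov tok (assign_oov tok)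

-- ===== LEMMAS AND PROOFS =====

-- merging one character's severity code into the three-way chain
theorem code_chain_step (h : Char) (d p u : Bool) :
    max (codeB h) (if d then (3 : Int) else if p then 2 else if u then 1 else 0)
      = if (PySem.Chars.isdigit h || d) then 3
        else if (punctList.contains h || p) then 2
        else if (PySem.Chars.isupper h || u) then 1 else 0 := by
  unfold codeB
  rcases Bool.eq_false_or_eq_true (PySem.Chars.isdigit h) with h1 | h1 <;>
    rcases Bool.eq_false_or_eq_true (punctList.contains h) with h2 | h2 <;>
      rcases Bool.eq_false_or_eq_true (PySem.Chars.isupper h) with h3 | h3 <;>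
        rw [h1, h2, h3] <;> cases d <;> cases p <;> cases u <;> simp

-- the character fold computes the severity chain
theorem foldl_maxcode (l : List Char) (a : Int) (ha : 0 ≤ a) :
    l.foldl (fun m ch => max m (codeB ch)) a =
      max a (if l.any (fun c => PySem.Chars.isdigit c) then 3
             else if l.any (fun c => punctList.contains c) then 2
             else if l.any (fun c => PySem.Chars.isupper c) then 1 else 0) := by
  induction l generalizing a with
  | nil => simp [max_eq_left ha]
  | cons h t ih =>
    rw [List.foldl_cons, ih _ (le_trans ha (le_max_left _ _)), max_assoc, code_chain_step,
      List.any_cons, List.any_cons, List.any_cons]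

-- first-match lookup through a constant-valued block of keys
theorem get?_mk_mapConst (L : List String) (rest : List (String × Int)) (v : Int) (s : String) :
    (PySem.Dict.mk (L.map (fun t => (t, v)) ++ rest)).get? s
      = if s ∈ L then some v else (PySem.Dict.mk rest).get? s := by
  induction L with
  | nil => simp
  | cons h t ih =>
    rw [List.map_cons, List.cons_append, PySem.Dict.get?_mk_cons, ih]
    by_cases hs : h = s
    · subst hs; simp
    · simp [hs, Ne.symm hs, beq_iff_eq]

-- the dictionary as an items literal
set_option maxRecDepth 20000 in
theorem sufDict_eq : sufDict = PySem.Dict.mk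
    (noun_suffix.map (fun t => (t, (0 : Int))) ++ verb_suffix.map (fun t => (t, 1))
      ++ adj_suffix.map (fun t => (t, 2)) ++ adv_suffix.map (fun t => (t, 3)) ++ []) := by
  decide

-- sufDict lookup = first-match category chain
theorem sufDict_getD (s : String) :
    sufDict.getD s 4 =
      (if s ∈ noun_suffix then 0 else if s ∈ verb_suffix then 1
       else if s ∈ adj_suffix then 2 else if s ∈ adv_suffix then 3 else 4) := by
  have : sufDict.get? s =
      (if s ∈ noun_suffix then some 0 else if s ∈ verb_suffix then some 1
       else if s ∈ adj_suffix then some 2 else if s ∈ adv_suffix then some 3 else none) := by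
    rw [sufDict_eq]
    simp only [List.append_assoc]
    rw [get?_mk_mapConst, get?_mk_mapConst, get?_mk_mapConst, get?_mk_mapConst]
    rfl
  simp [PySem.Dict.getD, this]
  split_ifs <;> rfl

theorem foldl_min_le_init (g : Int → Int) (l : List Int) :
    ∀ a : Int, l.foldl (fun b k => min b (g k)) a ≤ a := by
  induction l with
  | nil => intro a; simp
  | cons h t ih => intro a; exact le_trans (ih (min a (g h))) (min_le_left _ _)

theorem foldl_min_le (g : Int → Int) (l : List Int) (x : Int) (hx : x ∈ l) :
    ∀ a : Int, l.foldl (fun b k => min b (g k)) a ≤ g x := by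
  induction l with
  | nil => cases hx
  | cons h t ih =>
    intro a
    rcases List.mem_cons.mp hx with rfl | hx'
    · exact le_trans (foldl_min_le_init g t (min a (g x))) (min_le_right _ _)
    · exact ih hx' _

theorem le_foldl_min (g : Int → Int) (l : List Int) (p : Int)
    (h : ∀ x ∈ l, p ≤ g x) : ∀ a : Int, p ≤ a → p ≤ l.foldl (fun b k => min b (g k)) a := by
  induction l with
  | nil => exact fun a ha => ha
  | cons hd t ih =>
    intro a ha
    exact ih (fun x hx => h x (List.mem_cons_of_mem _ hx)) _
      (le_min ha (h hd List.mem_cons_self))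

-- a category's endswith-scan succeeds iff some trailing slice of tok is in the category
theorem any_endswith_iff_slice (L : List String) (hlen : ∀ s ∈ L, 1 ≤ s.length ∧ s.length ≤ 6)
    (tok : String) :
    (L.any (fun s => PySem.Str.endswith tok s) = true)
      ↔ ∃ k ∈ PySem.List.pyRange 1 (min (PySem.Str.len tok) 6 + 1) 1,
          PySem.Str.slice tok (some (-k)) none ∈ L := by
  rw [List.any_eq_true]
  constructor
  · rintro ⟨s, hsL, hend⟩
    rw [PySem.Str.endswith_eq, PySem.Chars.endswith_iff] at hend
    obtain ⟨h1, h6⟩ := hlen s hsL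
    have hlenle : s.toList.length ≤ tok.toList.length := hend.length_le
    have hslice : PySem.Str.slice tok (some (-((s.toList.length : Nat) : Int))) none = s := by
      rw [← String.toList_inj, PySem.Str.toList_slice, PySem.Chars.slice_eq_listSlice,
        PySem.List.slice_from_neg_natCast _ _ (by rw [String.length_toList]; omega)]
      exact (List.suffix_iff_eq_drop.mp hend).symm
    refine ⟨((s.toList.length : Nat) : Int), ?_, ?_⟩
    · rw [PySem.List.mem_pyRange_one, PySem.Str.len_eq]
      rw [String.length_toList] at hlenle ⊢
      omega
    · rw [hslice]; exact hsL
  · rintro ⟨k, hk, hmem⟩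
    rw [PySem.List.mem_pyRange_one, PySem.Str.len_eq] at hk
    refine ⟨_, hmem, ?_⟩
    rw [PySem.Str.endswith_eq, PySem.Chars.endswith_iff, PySem.Str.toList_slice,
      PySem.Chars.slice_eq_listSlice]
    have hkn : -k = -((k.toNat : Nat) : Int) := by omega
    rw [hkn, PySem.List.slice_from_neg_natCast _ _ (by omega)]
    exact List.drop_suffix _ _

-- every dictionary priority is between 0 and 4
theorem sufDict_getD_bounds (s : String) : 0 ≤ sufDict.getD s 4 ∧ sufDict.getD s 4 ≤ 4 := by
  rw [sufDict_getD]; split_ifs <;> norm_num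

-- value of the suffix fold, stated on the four existence conditions
theorem best_eq (tok : String)
    (R : List Int) (_hR : R = PySem.List.pyRange 1 (min (PySem.Str.len tok) 6 + 1) 1) :
    R.foldl (fun best k => min best (sufDict.getD (PySem.Str.slice tok (some (-k)) none) 4)) 4
      = (if ∃ k ∈ R, PySem.Str.slice tok (some (-k)) none ∈ noun_suffix then 0
         else if ∃ k ∈ R, PySem.Str.slice tok (some (-k)) none ∈ verb_suffix then 1
         else if ∃ k ∈ R, PySem.Str.slice tok (some (-k)) none ∈ adj_suffix then 2
         else if ∃ k ∈ R, PySem.Str.slice tok (some (-k)) none ∈ adv_suffix then 3 else 4) := by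
  set g : Int → Int := fun k => sufDict.getD (PySem.Str.slice tok (some (-k)) none) 4 with hg
  have gval : ∀ k, g k = (if PySem.Str.slice tok (some (-k)) none ∈ noun_suffix then 0
      else if PySem.Str.slice tok (some (-k)) none ∈ verb_suffix then 1
      else if PySem.Str.slice tok (some (-k)) none ∈ adj_suffix then 2
      else if PySem.Str.slice tok (some (-k)) none ∈ adv_suffix then 3 else 4) :=
    fun k => sufDict_getD _
  split_ifs with e0 e1 e2 e3
  · obtain ⟨k, hk, hmem⟩ := e0
    refine le_antisymm ?_ (le_foldl_min g R 0 (fun x _ => (sufDict_getD_bounds _).1) 4 (by norm_num))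
    calc R.foldl (fun b k => min b (g k)) 4 ≤ g k := foldl_min_le g R k hk 4
      _ = 0 := by rw [gval]; simp [hmem]
  · obtain ⟨k, hk, hmem⟩ := e1
    have lower : ∀ x ∈ R, 1 ≤ g x := by
      intro x hx
      rw [gval]
      have hn : PySem.Str.slice tok (some (-x)) none ∉ noun_suffix :=
        fun h => e0 ⟨x, hx, h⟩
      split_ifs <;> omega
    refine le_antisymm ?_ (le_foldl_min g R 1 lower 4 (by norm_num))
    calc R.foldl (fun b k => min b (g k)) 4 ≤ g k := foldl_min_le g R k hk 4
      _ = 1 := by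
        rw [gval]
        have hn : PySem.Str.slice tok (some (-k)) none ∉ noun_suffix :=
          fun h => e0 ⟨k, hk, h⟩
        simp [hmem, hn]
  · obtain ⟨k, hk, hmem⟩ := e2
    have lower : ∀ x ∈ R, 2 ≤ g x := by
      intro x hx
      rw [gval]
      have hn : PySem.Str.slice tok (some (-x)) none ∉ noun_suffix :=
        fun h => e0 ⟨x, hx, h⟩
      have hv : PySem.Str.slice tok (some (-x)) none ∉ verb_suffix :=
        fun h => e1 ⟨x, hx, h⟩
      split_ifs <;> omega
    refine le_antisymm ?_ (le_foldl_min g R 2 lower 4 (by norm_num))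
    calc R.foldl (fun b k => min b (g k)) 4 ≤ g k := foldl_min_le g R k hk 4
      _ = 2 := by
        rw [gval]
        have hn : PySem.Str.slice tok (some (-k)) none ∉ noun_suffix :=
          fun h => e0 ⟨k, hk, h⟩
        have hv : PySem.Str.slice tok (some (-k)) none ∉ verb_suffix :=
          fun h => e1 ⟨k, hk, h⟩
        simp [hmem, hn, hv]
  · obtain ⟨k, hk, hmem⟩ := e3
    have lower : ∀ x ∈ R, 3 ≤ g x := by
      intro x hx
      rw [gval]
      have hn : PySem.Str.slice tok (some (-x)) none ∉ noun_suffix :=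
        fun h => e0 ⟨x, hx, h⟩
      have hv : PySem.Str.slice tok (some (-x)) none ∉ verb_suffix :=
        fun h => e1 ⟨x, hx, h⟩
      have hj : PySem.Str.slice tok (some (-x)) none ∉ adj_suffix :=
        fun h => e2 ⟨x, hx, h⟩
      split_ifs <;> omega
    refine le_antisymm ?_ (le_foldl_min g R 3 lower 4 (by norm_num))
    calc R.foldl (fun b k => min b (g k)) 4 ≤ g k := foldl_min_le g R k hk 4
      _ = 3 := by
        rw [gval]
        have hn : PySem.Str.slice tok (some (-k)) none ∉ noun_suffix :=
          fun h => e0 ⟨k, hk, h⟩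
        have hv : PySem.Str.slice tok (some (-k)) none ∉ verb_suffix :=
          fun h => e1 ⟨k, hk, h⟩
        have hj : PySem.Str.slice tok (some (-k)) none ∉ adj_suffix :=
          fun h => e2 ⟨k, hk, h⟩
        simp [hmem, hn, hv, hj]
  · have lower : ∀ x ∈ R, 4 ≤ g x := by
      intro x hx
      rw [gval]
      have hn : PySem.Str.slice tok (some (-x)) none ∉ noun_suffix :=
        fun h => e0 ⟨x, hx, h⟩
      have hv : PySem.Str.slice tok (some (-x)) none ∉ verb_suffix :=
        fun h => e1 ⟨x, hx, h⟩
      have hj : PySem.Str.slice tok (some (-x)) none ∉ adj_suffix :=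
        fun h => e2 ⟨x, hx, h⟩
      have ha : PySem.Str.slice tok (some (-x)) none ∉ adv_suffix :=
        fun h => e3 ⟨x, hx, h⟩
      split_ifs; omega
    exact le_antisymm (foldl_min_le_init g R 4) (le_foldl_min g R 4 lower 4 le_rfl)

-- ===== VERDICT (by name: the statement is the Claim_ definition above) =====
theorem assign_oov_spec : Claim_equal_assign_oov := by
  intro tok _
  unfold Spec_assign_oov assign_oov assign_oov_alt
  rw [foldl_maxcode _ _ le_rfl]
  rcases Bool.eq_false_or_eq_true (tok.toList.any fun c => PySem.Chars.isdigit c) with hd | hd <;>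
    rcases Bool.eq_false_or_eq_true (tok.toList.any fun c => punctList.contains c) with hp | hp <;>
      rcases Bool.eq_false_or_eq_true (tok.toList.any fun c => PySem.Chars.isupper c)
        with hu | hu <;>
    rw [hd, hp, hu] <;> simp only [Bool.false_eq_true, if_true, if_false] <;> try rfl
  -- remaining: no digit, no punctuation, no upper case
  rw [best_eq tok _ rfl]
  simp only [any_endswith_iff_slice noun_suffix (by decide) tok,
    any_endswith_iff_slice verb_suffix (by decide) tok,
    any_endswith_iff_slice adj_suffix (by decide) tok,
    any_endswith_iff_slice adv_suffix (by decide) tok]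
  norm_num
  split_ifs <;> rfl
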